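-- pv_equiv track=rewrite | github.com/soundcatchers/pascal | modules/enhanced_context_router.py | _check_topic_continuity
-- ===== SOURCE A (Python) =====
-- def _check_topic_continuity(query: str, context: str) -> bool:
--     """Check if current query continues the previous topic"""
--     query_lower = query.lower()
--
--     # Only check recent context (last few lines)
--     context_lines = context.split('\n')
--     recent_context = '\n'.join(context_lines[-6:])
--     context_lower = recent_context.lower()
--
--     # Define topic keywords
--     topic_keywords = {
--         'politics': ['prime minister', 'deputy', 'government', 'party', 'parliament', 'keir starmer'],
--         'f1': ['formula', 'race', 'grand prix', 'driver', 'circuit', 'f1'],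
--         'weather': ['weather', 'temperature', 'rain', 'sunny']
--     }
--
--     for topic, keywords in topic_keywords.items():
--         query_has_topic = any(keyword in query_lower for keyword in keywords)
--         context_has_topic = any(keyword in context_lower for keyword in keywords)
--
--         if query_has_topic and context_has_topic:
--             return True
--
--     return False
-- ===== SOURCE B (Python) =====
-- _TOPIC_KWS = [
--     ['prime minister', 'deputy', 'government', 'party', 'parliament', 'keir starmer'],
--     ['formula', 'race', 'grand prix', 'driver', 'circuit', 'f1'],
--     ['weather', 'temperature', 'rain', 'sunny'],
-- ]
--
-- # first characters of all keywords: only at these positions can a match start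
-- _FIRSTS = frozenset('pdgkfrcwts')
--
--
-- def _topic_hits(text):
--     """One left-to-right scan over the text's start positions: at each position
--     whose character can start a keyword, record which topics have a keyword
--     beginning there."""
--     hits = [False] * len(_TOPIC_KWS)
--     for i in range(len(text)):
--         if text[i] in _FIRSTS:
--             hits = [h or any(text.startswith(kw, i) for kw in kws)
--                     for h, kws in zip(hits, _TOPIC_KWS)]
--     return hits
--
-- def _check_topic_continuity(query: str, context: str) -> bool:
--     hq = _topic_hits(query.lower())
--     hc = _topic_hits('\n'.join(context.split('\n')[-6:]).lower())
--     return any(q and c for q, c in zip(hq, hc))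
-- ===== Notes on version B (the rewrite author's own statement) =====
-- stated objective: alternative
-- what changed: A asks per keyword whether it is contained in each text (substring search per keyword, per topic, with an early return); B instead makes one position-driven scan over each text, skipping positions whose character cannot start any keyword, recording per-topic hit flags at the remaining start positions, and then combines the two hit vectors.
import Mathlib
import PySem

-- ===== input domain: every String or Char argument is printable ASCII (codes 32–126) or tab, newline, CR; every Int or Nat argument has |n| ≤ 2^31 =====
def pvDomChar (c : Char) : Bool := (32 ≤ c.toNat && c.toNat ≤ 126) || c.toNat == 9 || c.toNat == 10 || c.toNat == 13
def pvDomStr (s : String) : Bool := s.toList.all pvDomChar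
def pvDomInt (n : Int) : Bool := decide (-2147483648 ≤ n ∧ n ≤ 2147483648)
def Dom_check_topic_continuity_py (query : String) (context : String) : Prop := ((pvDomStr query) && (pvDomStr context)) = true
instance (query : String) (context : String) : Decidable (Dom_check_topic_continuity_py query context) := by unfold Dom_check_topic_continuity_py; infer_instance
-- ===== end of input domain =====

-- B replaces A's keyword-driven containment loop (per topic, 'keyword in text' for each
-- keyword, early return) by a position-driven scan: one pass over the text's start
-- positions (filtered by a first-character set) recording per-topic hit flags, then the two
-- hit vectors are combined
-- (objective: alternative algorithm, same observable result).

-- ===== PORT A =====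
def pvTopicKeywords : List (String × List String) :=
  [("politics", ["prime minister", "deputy", "government", "party", "parliament", "keir starmer"]),
   ("f1", ["formula", "race", "grand prix", "driver", "circuit", "f1"]),
   ("weather", ["weather", "temperature", "rain", "sunny"])]

-- the 'for topic, keywords in topic_keywords.items():' loop with its early 'return True'
def pvLoopA (ql cl : String) : List (String × List String) → Bool
  | [] => false
  | (_, kws) :: rest =>
    let query_has_topic := kws.any (fun k => PySem.Str.isIn k ql)
    let context_has_topic := kws.any (fun k => PySem.Str.isIn k cl)
    if query_has_topic && context_has_topic then true
    else pvLoopA ql cl rest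

def check_topic_continuity_py (query : String) (context : String) : Bool :=
  let query_lower := PySem.Str.lower query
  let context_lines := (PySem.Str.split? context "\n").getD []   -- sep ≠ "", so split? is some
  let recent_context := PySem.Str.join "\n" (PySem.List.slice context_lines (some (-6)) none)
  let context_lower := PySem.Str.lower recent_context
  pvLoopA query_lower context_lower pvTopicKeywords

-- ===== PORT B =====
def pvTopicKws : List (List (List Char)) :=
  [["prime minister", "deputy", "government", "party", "parliament", "keir starmer"].map String.toList,
   ["formula", "race", "grand prix", "driver", "circuit", "f1"].map String.toList,
   ["weather", "temperature", "rain", "sunny"].map String.toList]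

-- _FIRSTS: first characters of all keywords ('pdgkfrcwts'); ported as a list of the distinct chars
def pvFirsts : List Char := ['p', 'd', 'g', 'k', 'f', 'r', 'c', 'w', 't', 's']

-- _topic_hits: one pass over start positions; 'text[i] in _FIRSTS' guards each position, and
-- 'text.startswith(kw, i)' for 0 ≤ i < len(text) is exactly 'kw is a prefix of text[i:]',
-- i.e. PySem.Chars.startswith (t.drop i) kw; 'text[i]' (always in range here) is t.getD i ' '.
def pvTopicHits (t : List Char) : List Bool :=
  (List.range t.length).foldl
    (fun hits i =>
      if pvFirsts.contains (t.getD i ' ') then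
        List.zipWith (fun h kws => h || kws.any (fun kw => PySem.Chars.startswith (t.drop i) kw))
          hits pvTopicKws
      else hits)
    (List.replicate pvTopicKws.length false)

def check_topic_continuity_py_alt (query : String) (context : String) : Bool :=
  let hq := pvTopicHits (PySem.Str.lower query).toList
  let hc := pvTopicHits (PySem.Str.lower (PySem.Str.join "\n"
      (PySem.List.slice ((PySem.Str.split? context "\n").getD []) (some (-6)) none))).toList
  (hq.zip hc).any (fun p => p.1 && p.2)

-- ===== PRECONDITION & SPEC =====
def Spec_check_topic_continuity_py (query : String) (context : String) (out : Bool) : Prop := out = check_topic_continuity_py_alt query context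
instance (query : String) (context : String) (out : Bool) : Decidable (Spec_check_topic_continuity_py query context out) := by unfold Spec_check_topic_continuity_py; infer_instance

-- ===== CLAIM (what is proved, stated in full; the proofs are below) =====
def Claim_equal_check_topic_continuity_py : Prop := ∀ (query : String) (context : String), Dom_check_topic_continuity_py query context → Spec_check_topic_continuity_py query context (check_topic_continuity_py query context)

-- ===== LEMMAS AND PROOFS =====

-- Loop invariant of the guarded position scan: starting from flags [b1,b2,b3], folding over
-- any position list l ORs into each flag whether some keyword of that topic starts at some
-- i ∈ l whose character passes the first-character filter.
theorem pvScan_inv (t : List Char) (l : List Nat) (b1 b2 b3 : Bool) :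
    l.foldl
      (fun hits i =>
        if pvFirsts.contains (t.getD i ' ') then
          List.zipWith (fun h kws => h || kws.any (fun kw => PySem.Chars.startswith (t.drop i) kw))
            hits pvTopicKws
        else hits)
      [b1, b2, b3]
    = [b1 || l.any (fun i => pvFirsts.contains (t.getD i ' ') && (pvTopicKws[0]!).any (fun kw => PySem.Chars.startswith (t.drop i) kw)),
       b2 || l.any (fun i => pvFirsts.contains (t.getD i ' ') && (pvTopicKws[1]!).any (fun kw => PySem.Chars.startswith (t.drop i) kw)),
       b3 || l.any (fun i => pvFirsts.contains (t.getD i ' ') && (pvTopicKws[2]!).any (fun kw => PySem.Chars.startswith (t.drop i) kw))] := by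
  induction l generalizing b1 b2 b3 with
  | nil => simp
  | cons i rest ih =>
      simp only [List.foldl_cons, List.any_cons]
      rcases hg : pvFirsts.contains (t.getD i ' ') with _ | _
      · rw [if_neg (by simp)]
        rw [ih]
        simp
      · rw [if_pos rfl]
        rw [show (List.zipWith (fun h kws => h || kws.any (fun kw => PySem.Chars.startswith (t.drop i) kw)) [b1, b2, b3] pvTopicKws)
              = [b1 || (pvTopicKws[0]!).any (fun kw => PySem.Chars.startswith (t.drop i) kw),
                 b2 || (pvTopicKws[1]!).any (fun kw => PySem.Chars.startswith (t.drop i) kw),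
                 b3 || (pvTopicKws[2]!).any (fun kw => PySem.Chars.startswith (t.drop i) kw)] from by
              simp [pvTopicKws]]
        rw [ih]
        simp [Bool.or_assoc]

-- A keyword can only start at a position holding its first character.
theorem pvStart_head (t : List Char) (i : Nat) (kw : List Char) (hkw : kw ≠ [])
    (h : PySem.Chars.startswith (t.drop i) kw = true) : t[i]? = some (kw.headD ' ') := by
  have hp : kw <+: t.drop i := (PySem.Chars.startswith_iff _ _).mp h
  rcases kw with _ | ⟨c0, rest⟩
  · exact absurd rfl hkw
  · rcases hp with ⟨u, hu⟩
    rw [← List.head?_drop, ← hu]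
    rfl

-- On positions inside the text, the first-character filter never loses a keyword hit.
theorem pvGuard_eq (t : List Char) (K : List (List Char))
    (hK : ∀ kw ∈ K, kw ≠ [] ∧ pvFirsts.contains (kw.headD ' ') = true) :
    (List.range t.length).any
        (fun i => pvFirsts.contains (t.getD i ' ') && K.any (fun kw => PySem.Chars.startswith (t.drop i) kw))
      = (List.range t.length).any (fun i => K.any (fun kw => PySem.Chars.startswith (t.drop i) kw)) := by
  rw [Bool.eq_iff_iff]
  simp only [List.any_eq_true, List.mem_range, Bool.and_eq_true]
  constructor
  · rintro ⟨i, hi, _, hKany⟩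
    exact ⟨i, hi, hKany⟩
  · rintro ⟨i, hi, hKany⟩
    refine ⟨i, hi, ?_, hKany⟩
    rcases hKany with ⟨kw, hkwK, hs⟩
    rcases hK kw hkwK with ⟨hne, hcF⟩
    have hti : t[i]? = some (kw.headD ' ') := pvStart_head t i kw hne hs
    have hch : t.getD i ' ' = kw.headD ' ' := by
      rw [List.getD_eq_getElem t ' ' hi]
      rw [List.getElem?_eq_getElem hi] at hti
      exact Option.some.inj hti
    rw [hch, hcF]

-- For a nonempty keyword, 'some start position in range(len t) works' is exactly 'kw in t'.
theorem pvPos_isIn (t kw : List Char) (hkw : kw ≠ []) :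
    (List.range t.length).any (fun i => PySem.Chars.startswith (t.drop i) kw)
      = PySem.Chars.isIn kw t := by
  rw [Bool.eq_iff_iff]
  simp only [List.any_eq_true, List.mem_range, PySem.Chars.startswith_iff]
  rw [← PySem.Chars.exists_prefix_drop_iff_isIn]
  constructor
  · rintro ⟨i, _, hp⟩; exact ⟨i, hp⟩
  · rintro ⟨j, hj⟩
    refine ⟨j, ?_, hj⟩
    by_contra hge
    have hnil : t.drop j = [] := List.drop_eq_nil_of_le (Nat.le_of_not_lt hge)
    rw [hnil] at hj
    exact hkw (List.prefix_nil.mp hj)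

-- Per topic: the scanned flag equals A's containment test, for keyword lists with no empty keyword.
theorem pvTopic_eq (t : List Char) (K : List (List Char)) (hK : ∀ kw ∈ K, kw ≠ []) :
    (List.range t.length).any (fun i => K.any (fun kw => PySem.Chars.startswith (t.drop i) kw))
      = K.any (fun kw => PySem.Chars.isIn kw t) := by
  rw [Bool.eq_iff_iff]
  simp only [List.any_eq_true, List.mem_range]
  constructor
  · rintro ⟨i, _, kw, hkwK, hs⟩
    exact ⟨kw, hkwK, (PySem.Chars.exists_prefix_drop_iff_isIn kw t).mp
      ⟨i, (PySem.Chars.startswith_iff _ _).mp hs⟩⟩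
  · rintro ⟨kw, hkwK, hin⟩
    rw [← pvPos_isIn t kw (hK kw hkwK)] at hin
    simp only [List.any_eq_true, List.mem_range] at hin
    rcases hin with ⟨i, hi, hs⟩
    exact ⟨i, hi, kw, hkwK, hs⟩

-- Core: on any two (lowered) strings the two programs' decision procedures agree.
theorem pvCore (ql cl : String) :
    pvLoopA ql cl pvTopicKeywords
      = ((pvTopicHits ql.toList).zip (pvTopicHits cl.toList)).any (fun p => p.1 && p.2) := by
  have hits : ∀ s : String, pvTopicHits s.toList
      = [(pvTopicKws[0]!).any (fun kw => PySem.Chars.isIn kw s.toList),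
         (pvTopicKws[1]!).any (fun kw => PySem.Chars.isIn kw s.toList),
         (pvTopicKws[2]!).any (fun kw => PySem.Chars.isIn kw s.toList)] := by
    intro s
    unfold pvTopicHits
    rw [show (List.replicate pvTopicKws.length false) = [false, false, false] from by simp [pvTopicKws]]
    rw [pvScan_inv s.toList (List.range s.toList.length) false false false]
    rw [pvGuard_eq s.toList (pvTopicKws[0]!) (by decide),
        pvGuard_eq s.toList (pvTopicKws[1]!) (by decide),
        pvGuard_eq s.toList (pvTopicKws[2]!) (by decide)]
    rw [pvTopic_eq s.toList (pvTopicKws[0]!) (by decide),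
        pvTopic_eq s.toList (pvTopicKws[1]!) (by decide),
        pvTopic_eq s.toList (pvTopicKws[2]!) (by decide)]
    simp
  rw [hits ql, hits cl]
  have hstr : ∀ (k : String) (s : String),
      PySem.Str.isIn k s = PySem.Chars.isIn k.toList s.toList := by
    intro k s; simp [PySem.Str.isIn_eq]
  simp only [pvLoopA, pvTopicKeywords, pvTopicKws, List.getElem!_cons_zero,
    List.getElem!_cons_succ, List.any_map, Function.comp_def, hstr]
  generalize (["prime minister", "deputy", "government", "party", "parliament",
      "keir starmer"] : List String).any (fun k => PySem.Chars.isIn k.toList ql.toList) = a1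
  generalize (["formula", "race", "grand prix", "driver", "circuit", "f1"] : List String).any
      (fun k => PySem.Chars.isIn k.toList ql.toList) = a2
  generalize (["weather", "temperature", "rain", "sunny"] : List String).any
      (fun k => PySem.Chars.isIn k.toList ql.toList) = a3
  generalize (["prime minister", "deputy", "government", "party", "parliament",
      "keir starmer"] : List String).any (fun k => PySem.Chars.isIn k.toList cl.toList) = b1
  generalize (["formula", "race", "grand prix", "driver", "circuit", "f1"] : List String).any
      (fun k => PySem.Chars.isIn k.toList cl.toList) = b2
  generalize (["weather", "temperature", "rain", "sunny"] : List String).any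
      (fun k => PySem.Chars.isIn k.toList cl.toList) = b3
  cases a1 <;> cases a2 <;> cases a3 <;> cases b1 <;> cases b2 <;> cases b3 <;> decide

-- ===== VERDICT (by name: the statement is the Claim_ definition above) =====
theorem check_topic_continuity_py_spec : Claim_equal_check_topic_continuity_py := by
  intro query context _
  unfold Spec_check_topic_continuity_py check_topic_continuity_py check_topic_continuity_py_alt
  exact pvCore _ _
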